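-- pv_equiv track=rewrite | github.com/therealmark75/trading-system | scrapers/calendar_scraper.py | flag_tickers_near_events
-- ===== SOURCE A (Python) =====
-- def flag_tickers_near_events(
--     tickers: list[str],
--     events:  list[dict],
--     earnings:list[dict],
-- ) -> dict[str, list[str]]:
--     """
--     For each ticker, return list of upcoming event warnings.
--     Used to add context to signal output.
--     """
--     warnings = {}
--     earnings_tickers = {e["ticker"]: e for e in earnings}
--
--     for ticker in tickers:
--         ticker_warnings = []
--
--         # Check earnings
--         if ticker in earnings_tickers:
--             e = earnings_tickers[ticker]
--             ticker_warnings.append(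
--                 f"⚡ Earnings {e.get('date','')} {e.get('timing','')}"
--             )
--
--         warnings[ticker] = ticker_warnings
--
--     return warnings
-- ===== SOURCE B (Python) =====
-- def flag_tickers_near_events(
--     tickers: list[str],
--     events:  list[dict],
--     earnings:list[dict],
-- ) -> dict[str, list[str]]:
--     # Drive the pass by the earnings list instead of the ticker list:
--     # seed every ticker with no warnings, then overwrite from each earnings record.
--     warnings = {t: [] for t in tickers}
--     ticker_set = set(tickers)
--     for e in earnings:
--         t = e["ticker"]
--         if t in ticker_set:
--             warnings[t] = [f"⚡ Earnings {e.get('date','')} {e.get('timing','')}"]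
--     return warnings
-- ===== Notes on version B (the rewrite author's own statement) =====
-- stated objective: alternative
-- what changed: B inverts the driving loop: instead of building an earnings-keyed dict and scanning tickers against it, B seeds {t: []} from the tickers, keeps a ticker set, and makes one pass over the earnings records, overwriting the warning entry of any record whose ticker is known (last record wins, as in A's dict comprehension).
import Mathlib
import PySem

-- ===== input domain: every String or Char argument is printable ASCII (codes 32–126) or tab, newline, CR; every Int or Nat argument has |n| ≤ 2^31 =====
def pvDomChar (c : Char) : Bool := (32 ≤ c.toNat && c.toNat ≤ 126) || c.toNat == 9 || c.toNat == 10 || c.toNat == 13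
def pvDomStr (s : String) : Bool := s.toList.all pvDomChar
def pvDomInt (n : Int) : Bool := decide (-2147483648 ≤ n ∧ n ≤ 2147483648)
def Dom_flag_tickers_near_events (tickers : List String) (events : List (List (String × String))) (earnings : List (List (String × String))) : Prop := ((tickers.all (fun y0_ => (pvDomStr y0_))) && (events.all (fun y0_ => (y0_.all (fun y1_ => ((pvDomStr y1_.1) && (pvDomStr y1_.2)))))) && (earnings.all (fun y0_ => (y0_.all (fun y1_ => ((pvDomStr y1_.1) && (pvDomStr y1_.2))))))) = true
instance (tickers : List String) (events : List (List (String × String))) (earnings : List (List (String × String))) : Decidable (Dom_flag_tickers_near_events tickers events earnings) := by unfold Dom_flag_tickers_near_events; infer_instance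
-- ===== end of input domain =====

-- B inverts the driving loop (one pass over earnings into a ticker-seeded dict) instead of
-- scanning tickers against an earnings-keyed dict; same return value, same cost ("alternative").


-- shared helpers: a Python dict given as an assoc list (lookup = first match)
def pvLookup (e : List (String × String)) (k : String) : Option String :=
  (e.find? (fun p => p.1 == k)).map (·.2)

-- e["ticker"]; total form — Pre_ guarantees the key is present
def pvKey (e : List (String × String)) : String := (pvLookup e "ticker").getD ""

-- f"⚡ Earnings {e.get('date','')} {e.get('timing','')}"
def pvMsg (e : List (String × String)) : String :=
  "⚡ Earnings " ++ (pvLookup e "date").getD "" ++ " " ++ (pvLookup e "timing").getD ""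

-- ===== PORT A =====
def flag_tickers_near_events (tickers : List String) (events : List (List (String × String))) (earnings : List (List (String × String))) : List (String × List String) :=
  -- earnings_tickers = {e["ticker"]: e for e in earnings}
  let earningsTickers : PySem.Dict String (List (String × String)) :=
    earnings.foldl (fun d e => d.insert (pvKey e) e) PySem.Dict.empty
  -- for ticker in tickers: ticker_warnings = [...] ; warnings[ticker] = ticker_warnings
  let warnings : PySem.Dict String (List String) :=
    tickers.foldl (fun w t =>
      w.insert t (match earningsTickers.get? t with
        | some e => [pvMsg e]      -- ticker in earnings_tickers: append the message
        | none => [])) PySem.Dict.empty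
  warnings.items

-- ===== PORT B =====
def flag_tickers_near_events_alt (tickers : List String) (events : List (List (String × String))) (earnings : List (List (String × String))) : List (String × List String) :=
  -- warnings = {t: [] for t in tickers}
  let seeded : PySem.Dict String (List String) :=
    tickers.foldl (fun w t => w.insert t ([] : List String)) PySem.Dict.empty
  -- ticker_set = set(tickers)
  let tset : PySem.Set String := PySem.Set.ofList tickers
  -- for e in earnings: t = e["ticker"]; if t in ticker_set: warnings[t] = [msg]
  let res : PySem.Dict String (List String) :=
    earnings.foldl (fun w e =>
      let t := pvKey e
      if t ∈ tset then w.insert t [pvMsg e] else w) seeded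
  res.items

-- ===== PRECONDITION & SPEC =====
-- Pre_ excludes exactly the inputs where some earnings record lacks the "ticker" key,
-- on which Python A raises KeyError (and B raises too); A is total otherwise.
def Pre_flag_tickers_near_events (tickers : List String) (events : List (List (String × String))) (earnings : List (List (String × String))) : Prop :=
  earnings.all (fun e => e.any (fun p => p.1 == "ticker")) = true
instance (tickers : List String) (events : List (List (String × String))) (earnings : List (List (String × String))) : Decidable (Pre_flag_tickers_near_events tickers events earnings) := by unfold Pre_flag_tickers_near_events; infer_instance

def pvWitness_flag_tickers_near_events : List String × (List (List (String × String))) × (List (List (String × String))) :=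
  (["AAPL", "MSFT"], [], [[("ticker", "AAPL"), ("date", "2024-01-01"), ("timing", "amc")]])

def Spec_flag_tickers_near_events (tickers : List String) (events : List (List (String × String))) (earnings : List (List (String × String))) (out : List (String × List String)) : Prop := out = flag_tickers_near_events_alt tickers events earnings
instance (tickers : List String) (events : List (List (String × String))) (earnings : List (List (String × String))) (out : List (String × List String)) : Decidable (Spec_flag_tickers_near_events tickers events earnings out) := by unfold Spec_flag_tickers_near_events; infer_instance

-- ===== CLAIM (what is proved, stated in full; the proofs are below) =====
def Claim_equal_flag_tickers_near_events : Prop := ∀ (tickers : List String) (events : List (List (String × String))) (earnings : List (List (String × String))), Dom_flag_tickers_near_events tickers events earnings → Pre_flag_tickers_near_events tickers events earnings → Spec_flag_tickers_near_events tickers events earnings (flag_tickers_near_events tickers events earnings)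

-- ===== LEMMAS AND PROOFS =====

-- the last earnings record whose "ticker" value is t (what both dict-building passes keep)
def pvLastMatch : List (List (String × String)) → String → Option (List (String × String))
  | [], _ => none
  | e :: es, t => match pvLastMatch es t with
    | some x => some x
    | none => if pvKey e = t then some e else none

-- A's earnings dict looks up the last matching record
theorem pv_get?_earningsFold (es : List (List (String × String)))
    (d : PySem.Dict String (List (String × String))) (t : String) :
    (es.foldl (fun d e => d.insert (pvKey e) e) d).get? t
      = match pvLastMatch es t with
        | some x => some x
        | none => d.get? t := by
  induction es generalizing d with
  | nil => simp [pvLastMatch]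
  | cons e es ih =>
    simp only [List.foldl_cons, ih, pvLastMatch]
    cases h : pvLastMatch es t with
    | some x => simp
    | none =>
      simp only [PySem.Dict.get?_insert]
      by_cases ht : pvKey e = t
      · subst ht; simp
      · simp [ht, Ne.symm ht]

-- a fold inserting a key-determined value: lookup is the value iff the key was visited
theorem pv_getD_foldl_insert_fun (ts : List String) (g : String → List String)
    (d : PySem.Dict String (List String)) (t : String) :
    (ts.foldl (fun w x => w.insert x (g x)) d).getD t []
      = if t ∈ ts then g t else d.getD t [] := by
  induction ts generalizing d with
  | nil => simp
  | cons x ts ih =>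
    simp only [List.foldl_cons, ih, List.mem_cons]
    by_cases hts : t ∈ ts
    · simp [hts]
    · by_cases hx : t = x
      · subst hx; simp [hts]
      · simp [hts, hx, PySem.Dict.getD_insert]

-- B's earnings pass: lookup of a seeded key is the last matching record's message
theorem pv_getD_earnFold (es : List (List (String × String))) (tset : PySem.Set String)
    (w : PySem.Dict String (List String)) (t : String) :
    (es.foldl (fun w e =>
        let t := pvKey e
        if t ∈ tset then w.insert t [pvMsg e] else w) w).getD t []
      = if t ∈ tset then
          (match pvLastMatch es t with
            | some e => [pvMsg e]
            | none => w.getD t [])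
        else w.getD t [] := by
  induction es generalizing w with
  | nil => simp [pvLastMatch]
  | cons e es ih =>
    simp only [List.foldl_cons]
    by_cases hk : pvKey e ∈ tset
    · simp only [hk, if_true, ih, pvLastMatch]
      cases h : pvLastMatch es t with
      | some x =>
        by_cases ht : t ∈ tset
        · simp [ht]
        · have : t ≠ pvKey e := fun h' => ht (h' ▸ hk)
          simp [ht, PySem.Dict.getD_insert, this]
      | none =>
        by_cases ht : t ∈ tset
        · simp only [ht, if_true, PySem.Dict.getD_insert]
          by_cases hte : pvKey e = t
          · subst hte; simp
          · simp [hte, Ne.symm hte]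
        · have : t ≠ pvKey e := fun h' => ht (h' ▸ hk)
          simp [ht, PySem.Dict.getD_insert, this]
    · simp only [hk, if_false, ih, pvLastMatch]
      cases h : pvLastMatch es t with
      | some x => simp
      | none =>
        by_cases hte : pvKey e = t
        · subst hte; simp [hk]
        · simp [hte]

-- B's earnings pass never creates a key when every tset member is already present
theorem pv_keys_earnFold (es : List (List (String × String))) (tset : PySem.Set String)
    (w : PySem.Dict String (List String))
    (hw : ∀ t ∈ tset, w.contains t = true) :
    (es.foldl (fun w e =>
        let t := pvKey e
        if t ∈ tset then w.insert t [pvMsg e] else w) w).keys = w.keys := by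
  induction es generalizing w with
  | nil => rfl
  | cons e es ih =>
    simp only [List.foldl_cons]
    by_cases hk : pvKey e ∈ tset
    · simp only [hk, if_true]
      rw [ih]
      · exact PySem.Dict.keys_insert_of_contains _ _ (hw _ hk)
      · intro t ht
        rw [PySem.Dict.contains_insert]
        simp [hw _ ht]
    · simp only [hk, if_false, ih _ hw]

theorem flag_tickers_spec_aux (tickers : List String) (events : List (List (String × String))) (earnings : List (List (String × String))) :
    flag_tickers_near_events tickers events earnings
      = flag_tickers_near_events_alt tickers events earnings := by
  unfold flag_tickers_near_events flag_tickers_near_events_alt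
  simp only []
  -- the two warning dicts
  set E : PySem.Dict String (List (String × String)) :=
    earnings.foldl (fun d e => d.insert (pvKey e) e) PySem.Dict.empty with hE
  set dA : PySem.Dict String (List String) :=
    tickers.foldl (fun w t =>
      w.insert t (match E.get? t with
        | some e => [pvMsg e]
        | none => [])) PySem.Dict.empty with hdA
  set seeded : PySem.Dict String (List String) :=
    tickers.foldl (fun w t => w.insert t ([] : List String)) PySem.Dict.empty with hseed
  set dB : PySem.Dict String (List String) :=
    earnings.foldl (fun w e =>
      let t := pvKey e
      if t ∈ PySem.Set.ofList tickers then w.insert t [pvMsg e] else w) seeded with hdB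
  -- key lists agree
  have hkA : dA.keys = PySem.Set.ofList tickers := by
    rw [hdA, PySem.Dict.keys_foldl_insert]
    simp [PySem.Dict.keys_empty, PySem.Set.update_nil_left]
  have hkseed : seeded.keys = PySem.Set.ofList tickers := by
    rw [hseed, PySem.Dict.keys_foldl_insert]
    simp [PySem.Dict.keys_empty, PySem.Set.update_nil_left]
  have hseedc : ∀ t ∈ PySem.Set.ofList tickers, seeded.contains t = true := by
    intro t ht
    rw [(PySem.Dict.contains_iff_mem_keys _ _).2 _]
    rw [hkseed]; exact ht
  have hkB : dB.keys = PySem.Set.ofList tickers := by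
    rw [hdB, pv_keys_earnFold _ _ _ hseedc, hkseed]
  have hndA : dA.keys.Nodup := by rw [hkA]; exact PySem.Set.nodup_ofList tickers
  have hndB : dB.keys.Nodup := by rw [hkB]; exact PySem.Set.nodup_ofList tickers
  -- pointwise values agree
  have hval : ∀ t, dA.getD t [] = dB.getD t [] := by
    intro t
    have hA : dA.getD t [] = if t ∈ tickers then
        (match pvLastMatch earnings t with
          | some e => [pvMsg e]
          | none => []) else [] := by
      rw [hdA, pv_getD_foldl_insert_fun]
      have : E.get? t = pvLastMatch earnings t := by
        rw [hE, pv_get?_earningsFold]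
        cases pvLastMatch earnings t <;> simp
      rw [this]
      by_cases ht : t ∈ tickers <;> simp [ht]
    have hseedD : seeded.getD t [] = [] := by
      rw [hseed, pv_getD_foldl_insert_fun]
      by_cases ht : t ∈ tickers <;> simp [ht]
    have hB : dB.getD t [] = if t ∈ tickers then
        (match pvLastMatch earnings t with
          | some e => [pvMsg e]
          | none => []) else [] := by
      rw [hdB, pv_getD_earnFold]
      rw [hseedD]
      by_cases ht : t ∈ tickers
      · simp only [PySem.Set.mem_ofList, ht, if_true]
      · simp only [PySem.Set.mem_ofList, ht, if_false]
    rw [hA, hB]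
  -- items agree
  rw [PySem.Dict.items_eq_map_keys dA hndA [], PySem.Dict.items_eq_map_keys dB hndB [],
      hkA, hkB]
  exact List.map_congr_left (fun t _ => by rw [hval t])

-- ===== VERDICT (by name: the statement is the Claim_ definition above) =====
theorem flag_tickers_near_events_spec : Claim_equal_flag_tickers_near_events := by
  intro tickers events earnings _ _
  unfold Spec_flag_tickers_near_events
  exact flag_tickers_spec_aux tickers events earnings
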